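-- pv_equiv track=rewrite | github.com/viadee/eric | eric_nlp.py | reduce_decimal_points
-- ===== SOURCE A (Python) =====
-- def reduce_decimal_points(word):
--   word_modified = word.replace(",", ".")
--   ret_val = ""
--   first = True
--   for w in word_modified:
--     if w == ".":
--       if first:
--         ret_val += w
--         first = False
--     else:
--       ret_val += w
--
--   if ret_val:
--     if ret_val[0] == ".":
--       ret_val = f"0{ret_val}"
--     elif ret_val[-1] == ".":
--       ret_val = ret_val[:-1]
--   else:
--     ret_val = word
--
--   return ret_val
-- ===== SOURCE B (Python) =====
-- def reduce_decimal_points(word):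
--     s = word.replace(",", ".")
--     head, sep, tail = s.partition(".")
--     ret_val = head + sep + tail.replace(".", "")
--     if ret_val:
--         if ret_val[0] == ".":
--             return "0" + ret_val
--         if ret_val[-1] == ".":
--             return ret_val[:-1]
--         return ret_val
--     return word
-- ===== Notes on version B (the rewrite author's own statement) =====
-- stated objective: faster
-- what changed: Replaces the char-by-char accumulation loop with its boolean seen-a-dot flag by a partition at the earliest dot plus a bulk replace of the remaining dots, keeping the same boundary fixups.
import Mathlib
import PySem

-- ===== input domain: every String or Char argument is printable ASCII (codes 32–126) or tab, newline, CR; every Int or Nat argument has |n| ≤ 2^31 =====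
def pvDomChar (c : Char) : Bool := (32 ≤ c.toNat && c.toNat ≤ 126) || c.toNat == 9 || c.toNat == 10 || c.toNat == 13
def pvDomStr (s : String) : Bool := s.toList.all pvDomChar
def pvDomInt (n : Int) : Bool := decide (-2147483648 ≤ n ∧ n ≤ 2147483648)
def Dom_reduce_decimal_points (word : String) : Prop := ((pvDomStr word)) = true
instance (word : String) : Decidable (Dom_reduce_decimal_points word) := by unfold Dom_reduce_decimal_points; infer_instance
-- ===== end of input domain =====

-- B replaces A's char-by-char accumulation loop by partition-at-first-dot + bulk removal of later dots (objective: simpler).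

-- ===== PORT A =====
-- loop body of A: state = (ret_val, first)
def redA_step (st : List Char × Bool) (w : Char) : List Char × Bool :=
  if w = '.' then (if st.2 then (st.1 ++ [w], false) else st)
  else (st.1 ++ [w], st.2)

def reduce_decimal_points (word : String) : String :=
  -- word.replace(",", ".") on single-char patterns = charwise map
  let wm := word.toList.map (fun c => if c = ',' then '.' else c)
  let st := wm.foldl redA_step ([], true)
  let rv := st.1
  if rv = [] then word
  else if rv.head? = some '.' then String.ofList ('0' :: rv)        -- ret_val[0] == "." on nonempty rv
  else if rv.getLast? = some '.' then String.ofList rv.dropLast     -- ret_val[-1] == "." on nonempty rv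
  else String.ofList rv

-- ===== PORT B =====
def reduce_decimal_points_alt (word : String) : String :=
  -- s = word.replace(",", ".")
  let s := word.toList.map (fun c => if c = ',' then '.' else c)
  -- head, sep, tail = s.partition("."); ret_val = head + sep + tail.replace(".", "")
  let rv := match s.dropWhile (· != '.') with
    | [] => s                                                       -- no dot: partition gives (s, "", "")
    | sep :: rest => s.takeWhile (· != '.') ++ sep :: rest.filter (· != '.')
  match rv with
  | [] => word
  | c :: rest =>
    if c = '.' then String.ofList ('0' :: c :: rest)
    else if (c :: rest).getLast? = some '.' then String.ofList ((c :: rest).dropLast)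
    else String.ofList (c :: rest)

-- ===== PRECONDITION & SPEC =====
def Spec_reduce_decimal_points (word : String) (out : String) : Prop := out = reduce_decimal_points_alt word
instance (word : String) (out : String) : Decidable (Spec_reduce_decimal_points word out) := by unfold Spec_reduce_decimal_points; infer_instance

-- ===== CLAIM (what is proved, stated in full; the proofs are below) =====
def Claim_equal_reduce_decimal_points : Prop := ∀ (word : String), Dom_reduce_decimal_points word → Spec_reduce_decimal_points word (reduce_decimal_points word)

-- ===== LEMMAS AND PROOFS =====

-- A's loop with first = false appends exactly the non-dot chars
theorem foldl_redA_false (l acc : List Char) :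
    l.foldl redA_step (acc, false) = (acc ++ l.filter (· != '.'), false) := by
  induction l generalizing acc with
  | nil => simp
  | cons c t ih =>
    by_cases h : c = '.' <;> simp [redA_step, h, ih]

-- A's loop with first = true keeps everything up to and including the first dot, then filters dots
theorem foldl_redA_true (l acc : List Char) :
    l.foldl redA_step (acc, true) =
      (match l.dropWhile (· != '.') with
       | [] => (acc ++ l, true)
       | sep :: rest => (acc ++ l.takeWhile (· != '.') ++ sep :: rest.filter (· != '.'), false)) := by
  induction l generalizing acc with
  | nil => simp
  | cons c t ih =>
    by_cases h : c = '.'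
    · simp [redA_step, h, foldl_redA_false]
    · rw [List.foldl_cons]
      have hstep : redA_step (acc, true) c = (acc ++ [c], true) := by
        simp [redA_step, h]
      rw [hstep, ih]
      cases hdw : t.dropWhile (· != '.') <;>
        simp [List.dropWhile_cons, List.takeWhile_cons, h, hdw]

theorem dropWhile_head_false {p : Char → Bool} {l rest : List Char} {sep : Char}
    (h : l.dropWhile p = sep :: rest) : p sep = false := by
  induction l with
  | nil => simp at h
  | cons c t ih =>
    by_cases hc : p c = true
    · exact ih (by simpa [List.dropWhile_cons, hc] using h)
    · simp only [List.dropWhile_cons] at h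
      rw [if_neg hc] at h
      cases h
      simpa using hc

theorem takeWhile_head_true {p : Char → Bool} {l t : List Char} {a : Char}
    (h : l.takeWhile p = a :: t) : p a = true := by
  induction l with
  | nil => simp at h
  | cons c u ih =>
    by_cases hc : p c = true
    · simp only [List.takeWhile_cons, if_pos hc] at h
      cases h; exact hc
    · simp [List.takeWhile_cons, hc] at h

-- ===== VERDICT (by name: the statement is the Claim_ definition above) =====
theorem reduce_decimal_points_spec : Claim_equal_reduce_decimal_points := by
  intro word _
  unfold Spec_reduce_decimal_points reduce_decimal_points reduce_decimal_points_alt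
  simp only [foldl_redA_true]
  set s := word.toList.map (fun c => if c = ',' then '.' else c) with hs
  cases hd : s.dropWhile (· != '.') with
  | nil =>
    simp only [hd]
    cases s with
    | nil => simp
    | cons c rest => by_cases h : c = '.' <;> simp [h]
  | cons sep rest =>
    have hsep : sep = '.' := by
      have := dropWhile_head_false hd; simpa using this
    subst hsep
    simp only [hd]
    cases htw : s.takeWhile (· != '.') with
    | nil => simp
    | cons a t =>
      have ha : a ≠ '.' := by
        have := takeWhile_head_true htw; simpa using this
      simp [ha]
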